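-- pv_equiv track=rewrite | github.com/SRDevPortal/sriaas_clinic | sriaas_clinic/api/user_group_backlink.py | _parse_group_name
-- ===== SOURCE A (Python) =====
-- from typing import Optional, Tuple, Set, List
--
-- SEGMENTS = ("Reception", "Fresh", "Repeat")
--
-- def _parse_group_name(name: str) -> Tuple[Optional[str], Optional[str]]:
--     name = (name or "").strip()
--     for seg in SEGMENTS:
--         suf = f" {seg}"
--         if name.endswith(suf):
--             dept = name[: -len(suf)].strip()
--             return (dept or None, seg)
--     return (None, None)
-- ===== SOURCE B (Python) =====
-- SEGMENTS = ("Reception", "Fresh", "Repeat")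
--
-- def _parse_group_name(name):
--     name = (name or "").strip()
--     head, sep, last = name.rpartition(" ")
--     if sep and last in SEGMENTS:
--         dept = head.strip()
--         return (dept or None, last)
--     return (None, None)
-- ===== Notes on version B (the rewrite author's own statement) =====
-- stated objective: idiomatic
-- what changed: Replaces the loop trying each ' <segment>' suffix with a single rpartition(' ') that splits off the last token once and looks it up in SEGMENTS.
import Mathlib
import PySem

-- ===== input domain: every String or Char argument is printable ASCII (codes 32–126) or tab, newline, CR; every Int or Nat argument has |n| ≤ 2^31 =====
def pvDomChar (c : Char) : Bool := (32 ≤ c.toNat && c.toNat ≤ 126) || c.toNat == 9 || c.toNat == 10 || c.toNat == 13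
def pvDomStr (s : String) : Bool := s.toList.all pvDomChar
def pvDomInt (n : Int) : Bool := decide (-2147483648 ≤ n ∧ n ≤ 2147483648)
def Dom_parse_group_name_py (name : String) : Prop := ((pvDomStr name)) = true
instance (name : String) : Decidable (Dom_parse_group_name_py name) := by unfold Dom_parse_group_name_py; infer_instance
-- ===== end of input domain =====

-- B replaces A's try-each-suffix loop by one rpartition(' ') split plus a membership test (idiomatic).

-- ===== PORT A =====
def SEGMENTS : List String := ["Reception", "Fresh", "Repeat"]

-- the for-loop over SEGMENTS, one branch per iteration
def pvALoop (name : String) : List String → Option String × Option String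
  | [] => (none, none)
  | seg :: rest =>
    let suf := " " ++ seg
    if PySem.Str.endswith name suf then
      let dept := PySem.Str.strip (PySem.Str.slice name none (some (-(PySem.Str.len suf : Int))))
      ((if dept = "" then none else some dept), some seg)
    else pvALoop name rest

def parse_group_name_py (name : String) : Option String × Option String :=
  pvALoop (PySem.Str.strip name) SEGMENTS

-- ===== PORT B =====
-- hand port of str.rpartition(" ") for the single-char separator: none encodes Python's
-- ("", "", name) no-separator result (B's `if sep` test), some (head, last) the split at the LAST space
def pvRPartSpace : List Char → Option (List Char × List Char)
  | [] => none
  | c :: cs =>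
    match pvRPartSpace cs with
    | some (h, l) => some (c :: h, l)
    | none => if c = ' ' then some ([], cs) else none

def parse_group_name_py_alt (name : String) : Option String × Option String :=
  let t := PySem.Str.strip name
  match pvRPartSpace t.toList with
  | some (h, l) =>
    if String.ofList l ∈ SEGMENTS then
      let dept := PySem.Str.strip (String.ofList h)
      ((if dept = "" then none else some dept), some (String.ofList l))
    else (none, none)
  | none => (none, none)

-- ===== PRECONDITION & SPEC =====
def Spec_parse_group_name_py (name : String) (out : Option String × Option String) : Prop := out = parse_group_name_py_alt name
instance (name : String) (out : Option String × Option String) : Decidable (Spec_parse_group_name_py name out) := by unfold Spec_parse_group_name_py; infer_instance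

-- ===== CLAIM (what is proved, stated in full; the proofs are below) =====
def Claim_equal_parse_group_name_py : Prop := ∀ (name : String), Dom_parse_group_name_py name → Spec_parse_group_name_py name (parse_group_name_py name)

-- ===== LEMMAS AND PROOFS =====

-- first-occurrence split is unique
lemma firstSplit : ∀ (a₁ b₁ a₂ b₂ : List Char), a₁ ++ ' ' :: b₁ = a₂ ++ ' ' :: b₂ →
    ' ' ∉ a₁ → ' ' ∉ a₂ → a₁ = a₂ ∧ b₁ = b₂ := by
  intro a₁
  induction a₁ with
  | nil =>
    intro b₁ a₂ b₂ heq _ h2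
    cases a₂ with
    | nil => simpa using heq
    | cons d a₂' =>
      simp only [List.nil_append, List.cons_append, List.cons.injEq] at heq
      exact absurd (heq.1 ▸ List.mem_cons_self) h2
  | cons c a₁' ih =>
    intro b₁ a₂ b₂ heq h1 h2
    cases a₂ with
    | nil =>
      simp only [List.nil_append, List.cons_append, List.cons.injEq] at heq
      exact absurd (heq.1 ▸ List.mem_cons_self) h1
    | cons d a₂' =>
      simp only [List.cons_append, List.cons.injEq] at heq
      have h1' : ' ' ∉ a₁' := fun hm => h1 (List.mem_cons_of_mem _ hm)
      have h2' : ' ' ∉ a₂' := fun hm => h2 (List.mem_cons_of_mem _ hm)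
      obtain ⟨he, hb⟩ := ih b₁ a₂' b₂ heq.2 h1' h2'
      exact ⟨by rw [heq.1, he], hb⟩

-- last-occurrence split is unique
lemma lastSplit (h₁ l₁ h₂ l₂ : List Char) (heq : h₁ ++ ' ' :: l₁ = h₂ ++ ' ' :: l₂)
    (n1 : ' ' ∉ l₁) (n2 : ' ' ∉ l₂) : h₁ = h₂ ∧ l₁ = l₂ := by
  have hr := congrArg List.reverse heq
  simp only [List.reverse_append, List.reverse_cons] at hr
  have hr' : l₁.reverse ++ ' ' :: h₁.reverse = l₂.reverse ++ ' ' :: h₂.reverse := by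
    simpa [List.append_assoc] using hr
  have n1' : ' ' ∉ l₁.reverse := by simpa using n1
  have n2' : ' ' ∉ l₂.reverse := by simpa using n2
  obtain ⟨ha, hb⟩ := firstSplit _ _ _ _ hr' n1' n2'
  constructor
  · have := congrArg List.reverse hb; simpa using this
  · have := congrArg List.reverse ha; simpa using this

lemma rpart_none : ∀ (cs : List Char), pvRPartSpace cs = none → ' ' ∉ cs := by
  intro cs
  induction cs with
  | nil => intro _; simp
  | cons c cs ih =>
    intro h
    simp only [pvRPartSpace] at h
    cases hr : pvRPartSpace cs with
    | some p => rw [hr] at h; simp at h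
    | none =>
      rw [hr] at h
      by_cases hc : c = ' '
      · simp [hc] at h
      · simp only [hc, if_false] at h
        simp only [List.mem_cons, not_or]
        exact ⟨fun he => hc he.symm, ih hr⟩

lemma rpart_some : ∀ (cs h l : List Char), pvRPartSpace cs = some (h, l) →
    cs = h ++ ' ' :: l ∧ ' ' ∉ l := by
  intro cs
  induction cs with
  | nil => intro h l hh; simp [pvRPartSpace] at hh
  | cons c cs ih =>
    intro h l hh
    simp only [pvRPartSpace] at hh
    cases hr : pvRPartSpace cs with
    | some p =>
      rw [hr] at hh
      obtain ⟨h', l'⟩ := p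
      simp only [Option.some.injEq, Prod.mk.injEq] at hh
      obtain ⟨hc, he⟩ := ih h' l' hr
      refine ⟨?_, hh.2 ▸ he⟩
      rw [← hh.1, ← hh.2]
      simp [hc]
    | none =>
      rw [hr] at hh
      by_cases hc : c = ' '
      · simp only [hc, if_true, Option.some.injEq, Prod.mk.injEq] at hh
        refine ⟨?_, hh.2 ▸ rpart_none cs hr⟩
        rw [← hh.1, ← hh.2]; simp [hc]
      · simp [hc] at hh

lemma endswith_iff_str (s : String) (seg : String) :
    PySem.Str.endswith s (" " ++ seg) = true ↔ (' ' :: seg.toList) <:+ s.toList := by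
  rw [PySem.Str.endswith_eq, PySem.Chars.endswith_iff]
  simp

-- A's slice name[:-len(suf)] when s.toList = h ++ ' ' :: l and len suf = l.length + 1
lemma slice_head (s : String) (h l : List Char) (hcs : s.toList = h ++ ' ' :: l)
    (k : Nat) (hk : k = l.length + 1) :
    PySem.Str.slice s none (some (-(k : Int))) = String.ofList h := by
  apply String.toList_inj.mp
  rw [PySem.Str.toList_slice, PySem.Chars.slice_eq_listSlice]
  rw [PySem.List.slice_to_neg_natCast _ _ (by omega)]
  rw [hcs]
  simp only [List.length_append, List.length_cons, String.toList_ofList, hk]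
  have : h.length + (l.length + 1) - (l.length + 1) = h.length := by omega
  rw [this]
  exact List.take_left

-- one segment's endswith test, decided by the rpartition of s
lemma endswith_of_rpart (s : String) (h l : List Char) (seg : String)
    (hcs : s.toList = h ++ ' ' :: l) (hnl : ' ' ∉ l) (hnseg : ' ' ∉ seg.toList) :
    PySem.Str.endswith s (" " ++ seg) = (String.ofList l == seg) := by
  by_cases hls : l = seg.toList
  · have h1 : PySem.Str.endswith s (" " ++ seg) = true := by
      rw [endswith_iff_str]
      exact ⟨h, by rw [← hls, ← hcs]⟩
    have h2 : String.ofList l = seg := by rw [hls, String.ofList_toList]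
    rw [h1, h2]
    simp
  · have h1 : PySem.Str.endswith s (" " ++ seg) = false := by
      rw [Bool.eq_false_iff]
      intro hc
      rw [endswith_iff_str] at hc
      obtain ⟨h₂, hh₂⟩ := hc
      have := lastSplit h₂ seg.toList h l (by rw [hh₂, hcs]) hnseg hnl
      exact hls this.2.symm
    have h2 : String.ofList l ≠ seg := by
      intro he
      exact hls (by simpa using congrArg String.toList he)
    rw [h1]
    simp [h2]

lemma endswith_none_case (s : String) (seg : String) (hs : ' ' ∉ s.toList) :
    PySem.Str.endswith s (" " ++ seg) = false := by
  rw [Bool.eq_false_iff]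
  intro hc
  rw [endswith_iff_str] at hc
  exact hs (hc.mem List.mem_cons_self)

lemma core (s : String) : pvALoop s SEGMENTS = (match pvRPartSpace s.toList with
  | some (h, l) =>
    if String.ofList l ∈ SEGMENTS then
      let dept := PySem.Str.strip (String.ofList h)
      ((if dept = "" then none else some dept), some (String.ofList l))
    else (none, none)
  | none => (none, none)) := by
  cases hr : pvRPartSpace s.toList with
  | none =>
    have hs := rpart_none _ hr
    have he1 := endswith_none_case s "Reception" hs
    have he2 := endswith_none_case s "Fresh" hs
    have he3 := endswith_none_case s "Repeat" hs
    simp only [SEGMENTS, pvALoop, he1, he2, he3, Bool.false_eq_true, if_false]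
  | some p =>
    obtain ⟨h, l⟩ := p
    obtain ⟨hcs, hnl⟩ := rpart_some _ _ _ hr
    have e1 := endswith_of_rpart s h l "Reception" hcs hnl (by decide)
    have e2 := endswith_of_rpart s h l "Fresh" hcs hnl (by decide)
    have e3 := endswith_of_rpart s h l "Repeat" hcs hnl (by decide)
    have hl1 : PySem.Str.len (" " ++ "Reception") = 10 := by decide
    have hl2 : PySem.Str.len (" " ++ "Fresh") = 6 := by decide
    have hl3 : PySem.Str.len (" " ++ "Repeat") = 7 := by decide
    by_cases c1 : l = "Reception".toList
    · have hS : String.ofList l = "Reception" := by rw [c1, String.ofList_toList]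
      have hsl0 := slice_head s h l hcs 10 (by rw [c1]; decide)
      have hsl : PySem.Str.slice s none (some (-10)) = String.ofList h := by
        simpa using hsl0
      have he1 : PySem.Str.endswith s (" " ++ "Reception") = true := by
        rw [e1, hS]; decide
      simp only [SEGMENTS, pvALoop, he1, if_true, hl1, hsl, hS]
      simp
    · by_cases c2 : l = "Fresh".toList
      · have hS : String.ofList l = "Fresh" := by rw [c2, String.ofList_toList]
        have hsl0 := slice_head s h l hcs 6 (by rw [c2]; decide)
        have he1 : PySem.Str.endswith s (" " ++ "Reception") = false := by
          rw [e1, hS]; decide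
        have hsl : PySem.Str.slice s none (some (-6)) = String.ofList h := by
          simpa using hsl0
        have he2 : PySem.Str.endswith s (" " ++ "Fresh") = true := by
          rw [e2, hS]; decide
        simp only [SEGMENTS, pvALoop, he1, he2, Bool.false_eq_true, if_false, if_true,
          hl1, hl2, hsl, hS]
        simp
      · by_cases c3 : l = "Repeat".toList
        · have hS : String.ofList l = "Repeat" := by rw [c3, String.ofList_toList]
          have hsl0 := slice_head s h l hcs 7 (by rw [c3]; decide)
          have he1 : PySem.Str.endswith s (" " ++ "Reception") = false := by
            rw [e1, hS]; decide
          have he2 : PySem.Str.endswith s (" " ++ "Fresh") = false := by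
            rw [e2, hS]; decide
          have hsl : PySem.Str.slice s none (some (-7)) = String.ofList h := by
            simpa using hsl0
          have he3 : PySem.Str.endswith s (" " ++ "Repeat") = true := by
            rw [e3, hS]; decide
          simp only [SEGMENTS, pvALoop, he1, he2, he3, Bool.false_eq_true, if_false,
            if_true, hl1, hl2, hl3, hsl, hS]
          simp
        · have n1 : String.ofList l ≠ "Reception" := by
            intro he; exact c1 (by simpa using congrArg String.toList he)
          have n2 : String.ofList l ≠ "Fresh" := by
            intro he; exact c2 (by simpa using congrArg String.toList he)
          have n3 : String.ofList l ≠ "Repeat" := by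
            intro he; exact c3 (by simpa using congrArg String.toList he)
          have he1 : PySem.Str.endswith s (" " ++ "Reception") = false := by
            rw [e1]; simp [n1]
          have he2 : PySem.Str.endswith s (" " ++ "Fresh") = false := by
            rw [e2]; simp [n2]
          have he3 : PySem.Str.endswith s (" " ++ "Repeat") = false := by
            rw [e3]; simp [n3]
          simp only [SEGMENTS, pvALoop, he1, he2, he3, Bool.false_eq_true, if_false]
          simp [n1, n2, n3]

-- ===== VERDICT (by name: the statement is the Claim_ definition above) =====
theorem parse_group_name_py_spec : Claim_equal_parse_group_name_py := by
  intro name _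
  unfold Spec_parse_group_name_py parse_group_name_py parse_group_name_py_alt
  exact core (PySem.Str.strip name)
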